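-- pv_equiv track=rewrite | github.com/vfunnny2000/Python_part_2 | HW_4/task_sem_7.py | calculate_profit_loss
-- ===== SOURCE A (Python) =====
-- def calculate_profit_loss(company_data):
--     result = {}
--     is_profitable = True
--
--     for company, data in company_data.items():
--         expenses = sum(data[:len(data)//2])
--         earnings = sum(data[len(data)//2:])
--
--         profit_loss = earnings - expenses
--         result[company] = profit_loss
--
--         if profit_loss < 0:
--             is_profitable = False
--
--     return result, is_profitable
-- ===== SOURCE B (Python) =====
-- def calculate_profit_loss(company_data):
--     # One signed pass per company: entries in the first half count negative
--     # (expenses), entries in the second half positive (earnings) -- no slicing,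
--     # no separate sums.  The profitability flag is derived afterwards from the
--     # minimum profit/loss instead of a running boolean.
--     result = {}
--     for company, data in company_data.items():
--         half = len(data) // 2
--         total = 0
--         for i, x in enumerate(data):
--             total += x if i >= half else -x
--         result[company] = total
--     return result, min(result.values(), default=0) >= 0
-- ===== Notes on version B (the rewrite author's own statement) =====
-- stated objective: alternative
-- what changed: Per company, B computes the profit/loss in a single signed pass over enumerate(data) (first-half entries subtracted, second-half added) instead of A's two slice-and-sum passes, and derives the profitability flag afterwards from min(result.values(), default=0) >= 0 instead of A's loop-fused running boolean.
import Mathlib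
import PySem

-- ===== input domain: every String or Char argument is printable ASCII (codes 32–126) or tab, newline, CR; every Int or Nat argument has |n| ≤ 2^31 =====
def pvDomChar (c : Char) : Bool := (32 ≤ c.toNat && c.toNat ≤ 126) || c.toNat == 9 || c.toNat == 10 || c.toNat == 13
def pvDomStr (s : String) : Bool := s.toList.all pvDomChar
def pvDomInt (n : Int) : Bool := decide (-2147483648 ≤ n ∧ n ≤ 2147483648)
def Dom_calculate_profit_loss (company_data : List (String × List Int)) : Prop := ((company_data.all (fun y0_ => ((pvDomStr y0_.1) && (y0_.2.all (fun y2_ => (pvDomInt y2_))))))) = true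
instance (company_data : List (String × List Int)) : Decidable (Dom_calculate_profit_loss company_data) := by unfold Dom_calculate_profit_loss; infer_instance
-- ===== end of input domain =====

-- B replaces A's two slice-sums per company by a single signed pass over the enumerated
-- data (first-half entries negated) and derives the flag from the minimum value instead
-- of a running boolean; a different decomposition, same cost.


-- ===== PORT A =====
def calculate_profit_loss (company_data : List (String × List Int)) : (List (String × Int)) × Bool :=
  let st := company_data.foldl
    (fun (st : PySem.Dict String Int × Bool) p =>
      let expenses := (PySem.List.slice p.2 none (some (PySem.Int.floordiv (p.2.length : Int) 2))).sum
      let earnings := (PySem.List.slice p.2 (some (PySem.Int.floordiv (p.2.length : Int) 2)) none).sum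
      let profit_loss := earnings - expenses
      let result := st.1.insert p.1 profit_loss
      (result, if profit_loss < 0 then false else st.2))
    (PySem.Dict.empty, true)
  (st.1.items, st.2)

-- ===== PORT B =====
-- total = 0; for i, x in enumerate(data): total += x if i >= half else -x
def pvProfitB (data : List Int) : Int :=
  let half := PySem.Int.floordiv (data.length : Int) 2
  (PySem.List.enumerate data 0).foldl (fun t p => t + if half ≤ p.1 then p.2 else -p.2) 0

def calculate_profit_loss_alt (company_data : List (String × List Int)) : (List (String × Int)) × Bool :=
  let result := company_data.foldl
    (fun (d : PySem.Dict String Int) p => d.insert p.1 (pvProfitB p.2)) PySem.Dict.empty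
  (result.items, decide (0 ≤ (PySem.List.min? result.values (fun v => v)).getD 0))

-- ===== PRECONDITION & SPEC =====
-- Pre_ excludes association lists with duplicate keys: they do not represent any Python dict
-- (A's argument IS a dict), so no Python input is excluded.
def Pre_calculate_profit_loss (company_data : List (String × List Int)) : Prop :=
  (company_data.map Prod.fst).Nodup
instance (company_data : List (String × List Int)) : Decidable (Pre_calculate_profit_loss company_data) := by unfold Pre_calculate_profit_loss; infer_instance
def pvWitness_calculate_profit_loss : (List (String × List Int)) :=
  [("acme", [3, 1, 2, 7]), ("beta", [5, 1])]
def Spec_calculate_profit_loss (company_data : List (String × List Int)) (out : (List (String × Int)) × Bool) : Prop := out = calculate_profit_loss_alt company_data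
instance (company_data : List (String × List Int)) (out : (List (String × Int)) × Bool) : Decidable (Spec_calculate_profit_loss company_data out) := by unfold Spec_calculate_profit_loss; infer_instance

-- ===== CLAIM (what is proved, stated in full; the proofs are below) =====
def Claim_equal_calculate_profit_loss : Prop := ∀ (company_data : List (String × List Int)), Dom_calculate_profit_loss company_data → Pre_calculate_profit_loss company_data → Spec_calculate_profit_loss company_data (calculate_profit_loss company_data)

-- ===== LEMMAS AND PROOFS =====

-- signed pass over indices all ≥ h adds the plain sum
theorem pvSigned_pos (xs : List Int) (h : Int) :
    ∀ (s t : Int), h ≤ s →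
    (PySem.List.enumerate xs s).foldl (fun t p => t + if h ≤ p.1 then p.2 else -p.2) t
      = t + xs.sum := by
  induction xs with
  | nil => intro s t _; simp [PySem.List.enumerate_nil]
  | cons x xs ih =>
    intro s t hs
    rw [PySem.List.enumerate_cons, List.foldl_cons, ih (s + 1) _ (by omega)]
    simp only [if_pos hs, List.sum_cons]
    ring

-- signed pass over indices all < h subtracts the plain sum
theorem pvSigned_neg (xs : List Int) (h : Int) :
    ∀ (s t : Int), s + xs.length ≤ h →
    (PySem.List.enumerate xs s).foldl (fun t p => t + if h ≤ p.1 then p.2 else -p.2) t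
      = t - xs.sum := by
  induction xs with
  | nil => intro s t _; simp [PySem.List.enumerate_nil]
  | cons x xs ih =>
    intro s t hs
    simp only [List.length_cons] at hs
    rw [PySem.List.enumerate_cons, List.foldl_cons, ih (s + 1) _ (by omega)]
    rw [if_neg (by omega)]
    simp only [List.sum_cons]
    ring

-- B's signed one-pass total equals A's second-half-sum minus first-half-sum
theorem pvProfitB_eq (data : List Int) :
    pvProfitB data
      = (PySem.List.slice data (some (PySem.Int.floordiv (data.length : Int) 2)) none).sum
        - (PySem.List.slice data none (some (PySem.Int.floordiv (data.length : Int) 2))).sum := by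
  have h2 : PySem.Int.floordiv (data.length : Int) 2 = (data.length : Int) / 2 :=
    PySem.Int.floordiv_eq_ediv_of_pos (by norm_num)
  set h := PySem.Int.floordiv (data.length : Int) 2 with hh
  have hnn : 0 ≤ h := by rw [h2]; omega
  have hle : h ≤ (data.length : Int) := by rw [h2]; omega
  rw [PySem.List.slice_from _ hnn, PySem.List.slice_to _ hnn]
  unfold pvProfitB
  rw [← hh]
  have hk : ((h.toNat : Int)) = h := Int.toNat_of_nonneg hnn
  have hsplit : data = data.take h.toNat ++ data.drop h.toNat := (List.take_append_drop _ _).symm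
  have hlen : (data.take h.toNat).length = h.toNat := by
    rw [List.length_take]; omega
  conv_lhs => rw [hsplit]
  rw [PySem.List.enumerate_append, List.foldl_append]
  rw [pvSigned_neg _ _ 0 0 (by rw [hlen]; omega)]
  rw [pvSigned_pos _ _ _ _ (by rw [hlen]; omega)]
  ring

-- the dict component of A's fold ignores the boolean component, and its entries are B's
theorem pvFoldA_fst (l : List (String × List Int)) (d : PySem.Dict String Int) (b : Bool) :
    (l.foldl (fun (st : PySem.Dict String Int × Bool) p =>
        let expenses := (PySem.List.slice p.2 none (some (PySem.Int.floordiv (p.2.length : Int) 2))).sum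
        let earnings := (PySem.List.slice p.2 (some (PySem.Int.floordiv (p.2.length : Int) 2)) none).sum
        let profit_loss := earnings - expenses
        let result := st.1.insert p.1 profit_loss
        (result, if profit_loss < 0 then false else st.2)) (d, b)).1
      = l.foldl (fun (d : PySem.Dict String Int) p => d.insert p.1 (pvProfitB p.2)) d := by
  induction l generalizing d b with
  | nil => rfl
  | cons p l ih =>
    simp only [List.foldl_cons]
    rw [ih]
    simp only [pvProfitB_eq]

-- the boolean component of A's fold is the running conjunction of the per-item tests
theorem pvFoldA_snd (l : List (String × List Int)) (d : PySem.Dict String Int) (b : Bool) :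
    (l.foldl (fun (st : PySem.Dict String Int × Bool) p =>
        let expenses := (PySem.List.slice p.2 none (some (PySem.Int.floordiv (p.2.length : Int) 2))).sum
        let earnings := (PySem.List.slice p.2 (some (PySem.Int.floordiv (p.2.length : Int) 2)) none).sum
        let profit_loss := earnings - expenses
        let result := st.1.insert p.1 profit_loss
        (result, if profit_loss < 0 then false else st.2)) (d, b)).2
      = (b && l.all (fun p => decide (0 ≤ pvProfitB p.2))) := by
  induction l generalizing d b with
  | nil => simp
  | cons p l ih =>
    simp only [List.foldl_cons, List.all_cons]
    rw [ih, ← pvProfitB_eq]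
    by_cases h : pvProfitB p.2 < 0
    · simp [h, not_le.mpr h]
    · simp [h, not_lt.mp h]

-- the running-min loop is nonnegative iff every element is
theorem pvFoldMin_nonneg (t : List Int) :
    ∀ (x : Int), decide (0 ≤ t.foldl min x)
      = (decide (0 ≤ x) && t.all (fun v => decide (0 ≤ v))) := by
  induction t with
  | nil => intro x; simp
  | cons y t ih =>
    intro x
    rw [List.foldl_cons, ih (min x y), List.all_cons]
    have hmin : decide (0 ≤ min x y) = (decide (0 ≤ x) && decide (0 ≤ y)) := by
      by_cases hx : 0 ≤ x <;> by_cases hy : 0 ≤ y <;>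
        simp [hx, hy, le_min_iff]
    rw [hmin, Bool.and_assoc]

-- min(vs, default=0) >= 0 is the all-nonnegative test
theorem pvMinD_nonneg (vs : List Int) :
    decide (0 ≤ (PySem.List.min? vs (fun v => v)).getD 0)
      = vs.all (fun v => decide (0 ≤ v)) := by
  cases vs with
  | nil => simp [PySem.List.min?]
  | cons x t =>
    rw [PySem.List.min?_id_cons]
    simp only [Option.getD_some, List.all_cons]
    exact pvFoldMin_nonneg t x

theorem pvWitness_ok :
    Dom_calculate_profit_loss pvWitness_calculate_profit_loss ∧
      Pre_calculate_profit_loss pvWitness_calculate_profit_loss := by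
  constructor <;> decide

-- ===== VERDICT (by name: the statement is the Claim_ definition above) =====
theorem calculate_profit_loss_spec : Claim_equal_calculate_profit_loss := by
  intro cd _ hpre
  unfold Spec_calculate_profit_loss calculate_profit_loss calculate_profit_loss_alt
  simp only
  rw [pvFoldA_fst, pvFoldA_snd, Bool.true_and, pvMinD_nonneg]
  have hitems := PySem.Dict.items_foldl_insert_fresh (d := PySem.Dict.empty)
        (l := cd) (k := Prod.fst) (v := fun p => pvProfitB p.2)
        (fun p _ => PySem.Dict.contains_empty _) hpre
  simp only [PySem.Dict.values, hitems]
  simp [List.all_map, Function.comp_def, PySem.Dict.empty]
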